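-- pv_equiv track=rewrite | github.com/Linonia/NetPyx | utils/preprocessing.py | map_rating
-- ===== SOURCE A (Python) =====
-- def map_rating(rating):
--     """
--     Mappa il rating in una categoria generica di età.
--
--     :param rating: Valutazione originale del contenuto.
--     :return: Categoria di età corrispondente.
--     """
--     # Dizionario di mappatura delle categorie di età
--     categories = {
--         'Kids': ['G', 'TV-G', 'TV-Y'],  # Bambini piccoli
--         'Children': ['TV-Y7', 'TV-Y7-FV'],  # Bambini sopra i 7 anni
--         'Family': ['PG', 'TV-PG'],  # Contenuti adatti a tutta la famiglia
--         'Teens': ['PG-13', 'TV-14'],  # Adolescenti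
--         'Mature Teens': ['R'],  # Adolescenti Maggiorenni
--         'Adults': ['NC-17', 'TV-MA'],  # Contenuti per adulti
--         'Unrated': ['NR', 'Not Rated', 'UR']  # Non classificati
--     }
--
--     # Ricerca della categoria corrispondente al rating
--     for category, ratings in categories.items():
--         if rating in ratings:
--             return category
--
--     return "Unknown"
-- ===== SOURCE B (Python) =====
-- # Rule-based normalizer: strip an optional 'TV-' prefix once, then classify the
-- # core token with a short chain of guarded rules instead of scanning a table.
-- def map_rating(rating):
--     tv = rating.startswith('TV-')
--     core = rating[3:] if tv else rating
--     if core == 'G' or (tv and core == 'Y'):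
--         return 'Kids'
--     if tv and core in ('Y7', 'Y7-FV'):
--         return 'Children'
--     if core == 'PG':
--         return 'Family'
--     if (not tv and core == 'PG-13') or (tv and core == '14'):
--         return 'Teens'
--     if not tv and core == 'R':
--         return 'Mature Teens'
--     if (not tv and core == 'NC-17') or (tv and core == 'MA'):
--         return 'Adults'
--     if not tv and core in ('NR', 'Not Rated', 'UR'):
--         return 'Unrated'
--     return 'Unknown'
-- ===== Notes on version B (the rewrite author's own statement) =====
-- stated objective: alternative
-- what changed: Replaces A's scan over a category->ratings table by a rule-based classifier: strip an optional 'TV-' prefix once, then classify the remaining core token with a short guard chain (no table, no membership scans).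
import Mathlib
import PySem

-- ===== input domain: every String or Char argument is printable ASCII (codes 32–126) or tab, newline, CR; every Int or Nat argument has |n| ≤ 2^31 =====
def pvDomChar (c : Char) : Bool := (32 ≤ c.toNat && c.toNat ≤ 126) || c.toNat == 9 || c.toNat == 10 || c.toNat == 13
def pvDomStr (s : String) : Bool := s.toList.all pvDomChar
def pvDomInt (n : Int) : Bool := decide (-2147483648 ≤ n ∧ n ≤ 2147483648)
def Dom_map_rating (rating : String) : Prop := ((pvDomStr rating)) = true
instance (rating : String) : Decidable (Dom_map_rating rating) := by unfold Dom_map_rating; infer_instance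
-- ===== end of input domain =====

-- B strips an optional 'TV-' prefix once and classifies the core token by a rule chain,
-- instead of A's scan over a category→ratings table (alternative decomposition).

-- ===== PORT A =====
-- Port of A: iterate over the category table, return the first category whose list contains the rating.
def mapRatingCategories : List (String × List String) :=
  [("Kids", ["G", "TV-G", "TV-Y"]),
   ("Children", ["TV-Y7", "TV-Y7-FV"]),
   ("Family", ["PG", "TV-PG"]),
   ("Teens", ["PG-13", "TV-14"]),
   ("Mature Teens", ["R"]),
   ("Adults", ["NC-17", "TV-MA"]),
   ("Unrated", ["NR", "Not Rated", "UR"])]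

def mapRatingLoop (rating : String) : List (String × List String) → String
  | [] => "Unknown"
  | (category, ratings) :: rest =>
      if ratings.contains rating then category else mapRatingLoop rating rest

def map_rating (rating : String) : String :=
  mapRatingLoop rating mapRatingCategories

-- ===== PORT B =====
-- Port of B: tv = rating.startswith('TV-'); core = rating[3:] if tv else rating; rule chain on core.
def map_rating_alt (rating : String) : String :=
  let tv : Bool := PySem.Str.startswith rating "TV-"
  let core : String := if tv then PySem.Str.slice rating (some 3) none else rating
  if core = "G" ∨ (tv ∧ core = "Y") then "Kids"
  else if tv ∧ (core = "Y7" ∨ core = "Y7-FV") then "Children"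
  else if core = "PG" then "Family"
  else if (¬tv ∧ core = "PG-13") ∨ (tv ∧ core = "14") then "Teens"
  else if ¬tv ∧ core = "R" then "Mature Teens"
  else if (¬tv ∧ core = "NC-17") ∨ (tv ∧ core = "MA") then "Adults"
  else if ¬tv ∧ (core = "NR" ∨ core = "Not Rated" ∨ core = "UR") then "Unrated"
  else "Unknown"

-- ===== PRECONDITION & SPEC =====
def Spec_map_rating (rating : String) (out : String) : Prop := out = map_rating_alt rating
instance (rating : String) (out : String) : Decidable (Spec_map_rating rating out) := by unfold Spec_map_rating; infer_instance

-- ===== CLAIM (what is proved, stated in full; the proofs are below) =====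
def Claim_equal_map_rating : Prop := ∀ (rating : String), Dom_map_rating rating → Spec_map_rating rating (map_rating rating)

-- ===== LEMMAS AND PROOFS =====

-- If rating starts with 'TV-', its character list is 'T','V','-' followed by the slice rating[3:].
theorem startswith_TV_toList (s : String) (h : PySem.Str.startswith s "TV-" = true) :
    s.toList = 'T'::'V'::'-'::(PySem.Str.slice s (some 3) none).toList := by
  rw [PySem.Str.startswith_eq] at h
  obtain ⟨t, ht⟩ := (PySem.Chars.startswith_iff _ _).mp h
  have h3 : (3:Int) = ((3:Nat):Int) := rfl
  rw [PySem.Str.toList_slice, PySem.Chars.slice_eq_listSlice, h3, PySem.List.slice_from_natCast]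
  simp [← ht]

-- With 'TV-' prefix: if the slice rating[3:] equals c, then rating = "TV-" ++ c (as toList equality).
theorem rating_of_core (s c : String) (h : PySem.Str.startswith s "TV-" = true)
    (hc : PySem.Str.slice s (some 3) none = c) : s.toList = 'T'::'V'::'-'::c.toList := by
  rw [← hc]; exact startswith_TV_toList s h

-- ===== VERDICT (by name: the statement is the Claim_ definition above) =====
theorem map_rating_spec : Claim_equal_map_rating := by
  intro rating _
  show map_rating rating = map_rating_alt rating
  by_cases h1 : rating = "G";        · subst h1; decide
  by_cases h2 : rating = "TV-G";     · subst h2; decide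
  by_cases h3 : rating = "TV-Y";     · subst h3; decide
  by_cases h4 : rating = "TV-Y7";    · subst h4; decide
  by_cases h5 : rating = "TV-Y7-FV"; · subst h5; decide
  by_cases h6 : rating = "PG";       · subst h6; decide
  by_cases h7 : rating = "TV-PG";    · subst h7; decide
  by_cases h8 : rating = "PG-13";    · subst h8; decide
  by_cases h9 : rating = "TV-14";    · subst h9; decide
  by_cases h10 : rating = "R";       · subst h10; decide
  by_cases h11 : rating = "NC-17";   · subst h11; decide
  by_cases h12 : rating = "TV-MA";   · subst h12; decide
  by_cases h13 : rating = "NR";      · subst h13; decide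
  by_cases h14 : rating = "Not Rated"; · subst h14; decide
  by_cases h15 : rating = "UR";      · subst h15; decide
  -- rating is none of the 15 table entries: A returns "Unknown".
  have hA : map_rating rating = "Unknown" := by
    simp [map_rating, mapRatingLoop, mapRatingCategories,
      h1, h2, h3, h4, h5, h6, h7, h8, h9, h10, h11, h12, h13, h14, h15]
  rw [hA]
  by_cases htv : PySem.Str.startswith rating "TV-" = true
  · -- rating starts with 'TV-': every active core would force rating to be an excluded literal.
    have hcG : ¬ PySem.Str.slice rating (some 3) none = "G" := fun hc =>
      h2 (String.toList_inj.mp (by rw [rating_of_core rating _ htv hc]; rfl))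
    have hcY : ¬ PySem.Str.slice rating (some 3) none = "Y" := fun hc =>
      h3 (String.toList_inj.mp (by rw [rating_of_core rating _ htv hc]; rfl))
    have hcY7 : ¬ PySem.Str.slice rating (some 3) none = "Y7" := fun hc =>
      h4 (String.toList_inj.mp (by rw [rating_of_core rating _ htv hc]; rfl))
    have hcY7FV : ¬ PySem.Str.slice rating (some 3) none = "Y7-FV" := fun hc =>
      h5 (String.toList_inj.mp (by rw [rating_of_core rating _ htv hc]; rfl))
    have hcPG : ¬ PySem.Str.slice rating (some 3) none = "PG" := fun hc =>
      h7 (String.toList_inj.mp (by rw [rating_of_core rating _ htv hc]; rfl))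
    have hc14 : ¬ PySem.Str.slice rating (some 3) none = "14" := fun hc =>
      h9 (String.toList_inj.mp (by rw [rating_of_core rating _ htv hc]; rfl))
    have hcMA : ¬ PySem.Str.slice rating (some 3) none = "MA" := fun hc =>
      h12 (String.toList_inj.mp (by rw [rating_of_core rating _ htv hc]; rfl))
    rw [PySem.Str.startswith_eq] at htv
    have htv' : PySem.Chars.startswith rating.toList ['T','V','-'] = true := htv
    simp [map_rating_alt, htv', hcG, hcY, hcY7, hcY7FV, hcPG, hc14, hcMA]
  · -- no 'TV-' prefix: core = rating, and every remaining guard is closed by h1..h15.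
    rw [PySem.Str.startswith_eq, Bool.not_eq_true] at htv
    have htv' : PySem.Chars.startswith rating.toList ['T','V','-'] = false := htv
    simp [map_rating_alt, htv',
      h1, h6, h8, h10, h11, h13, h14, h15]
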